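-- pv_equiv track=rewrite | github.com/DJV512/Advent-of-Code-2016 | Day2/main.py | part1
-- ===== SOURCE A (Python) =====
-- def part1(data):
--     keypad = {
--         (0,0): "1",
--         (0,1): "2",
--         (0,2): "3",
--         (1,0): "4",
--         (1,1): "5",
--         (1,2): "6",
--         (2,0): "7",
--         (2,1): "8",
--         (2,2): "9",
--     }
--
--     position = (1,1)
--     code = ""
--     for line in data:
--         for char in line:
--             if char == "U":
--                 if position[0] != 0:
--                     position = (position[0]-1, position[1])
--             elif char == "D":
--                 if position[0] != 2:
--                     position = (position[0]+1, position[1])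
--             elif char == "L":
--                 if position[1] != 0:
--                     position = (position[0], position[1]-1)
--             elif char == "R":
--                 if position[1] != 2:
--                     position = (position[0], position[1]+1)
--         code += keypad[position]
--
--
--     return code
-- ===== SOURCE B (Python) =====
-- def part1(data):
--     # alternative algorithm: for each line, compose the per-character moves into a full
--     # 9-state transition table (positions encoded as flat digits 0..8), then index it.
--     moves = {"U": -3, "D": 3, "L": -1, "R": 1}
--
--     def move(s, d):
--         if d is None:
--             return s
--         t = s + d
--         if d in (-3, 3):
--             return t if 0 <= t <= 8 else s
--         return t if t // 3 == s // 3 else s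
--
--     state = 4
--     code = ""
--     for line in data:
--         table = list(range(9))
--         for ch in line:
--             table = [move(s, moves.get(ch)) for s in table]
--         state = table[state]
--         code += str(state + 1)
--     return code
-- ===== Notes on version B (the rewrite author's own statement) =====
-- stated objective: alternative
-- what changed: Instead of walking a single (row,col) position with boundary guards, B encodes positions as flat digits 0..8 and, per line, composes the per-character moves into a full 9-state transition table (simulating the automaton on all states at once), then indexes the table and emits str(state+1) in closed form.
import Mathlib
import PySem

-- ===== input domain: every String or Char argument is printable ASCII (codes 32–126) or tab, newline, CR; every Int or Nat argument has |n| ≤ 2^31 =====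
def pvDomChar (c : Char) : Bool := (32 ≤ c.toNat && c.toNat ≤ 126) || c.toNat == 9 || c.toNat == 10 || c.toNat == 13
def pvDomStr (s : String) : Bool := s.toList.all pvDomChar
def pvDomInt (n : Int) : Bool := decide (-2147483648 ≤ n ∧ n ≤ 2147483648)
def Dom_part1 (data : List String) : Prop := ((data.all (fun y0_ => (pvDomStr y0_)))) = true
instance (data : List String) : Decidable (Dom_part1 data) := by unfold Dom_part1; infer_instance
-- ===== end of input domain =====

-- B replaces A's single-position (row,col) walk with an automaton view: positions are flat
-- digits 0..8 and each line's moves are composed into a full 9-state transition table which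
-- is then indexed; the digit is the closed form str(state+1). Objective: alternative.

-- ===== PORT A =====
def part1Keypad : PySem.Dict (Int × Int) String :=
  PySem.Dict.ofList
    [((0,0),"1"), ((0,1),"2"), ((0,2),"3"),
     ((1,0),"4"), ((1,1),"5"), ((1,2),"6"),
     ((2,0),"7"), ((2,1),"8"), ((2,2),"9")]

-- one iteration of A's inner `for char in line` loop
def part1Step (p : Int × Int) (c : Char) : Int × Int :=
  if c = 'U' then (if p.1 ≠ 0 then (p.1 - 1, p.2) else p)
  else if c = 'D' then (if p.1 ≠ 2 then (p.1 + 1, p.2) else p)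
  else if c = 'L' then (if p.2 ≠ 0 then (p.1, p.2 - 1) else p)
  else if c = 'R' then (if p.2 ≠ 2 then (p.1, p.2 + 1) else p)
  else p

def part1 (data : List String) : String :=
  -- keypad[position]: the key is always present (position stays in 0..2 × 0..2),
  -- so Python's dict access never raises; ported with getD "".
  (data.foldl
    (fun (st : (Int × Int) × String) line =>
      let pos := line.toList.foldl part1Step st.1
      (pos, st.2 ++ PySem.Dict.getD part1Keypad pos ""))
    ((1, 1), "")).2

-- ===== PORT B =====
-- moves.get(ch)
def part1MoveOf (c : Char) : Option Int :=
  if c = 'U' then some (-3)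
  else if c = 'D' then some 3
  else if c = 'L' then some (-1)
  else if c = 'R' then some 1
  else none

-- def move(s, d) from Source B (d = None leaves the state unchanged)
def part1Move (s : Int) (d : Option Int) : Int :=
  match d with
  | none => s
  | some d =>
    let t := s + d
    if d = -3 ∨ d = 3 then (if 0 ≤ t ∧ t ≤ 8 then t else s)
    else (if PySem.Int.floordiv t 3 = PySem.Int.floordiv s 3 then t else s)

def part1_alt (data : List String) : String :=
  -- table[state]: state stays in 0..8 and the table always has 9 entries, so Python's
  -- list indexing never raises; ported with pyGet? + getD 0.
  (data.foldl
    (fun (st : Int × String) line =>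
      let table := line.toList.foldl
        (fun (t : List Int) ch => t.map (fun s => part1Move s (part1MoveOf ch)))
        (PySem.List.pyRange 0 9 1)
      let s := (PySem.List.pyGet? table st.1).getD 0
      (s, st.2 ++ PySem.Int.toStr (s + 1)))
    (4, "")).2

-- ===== PRECONDITION & SPEC =====
def Spec_part1 (data : List String) (out : String) : Prop := out = part1_alt data
instance (data : List String) (out : String) : Decidable (Spec_part1 data out) := by unfold Spec_part1; infer_instance

-- ===== CLAIM (what is proved, stated in full; the proofs are below) =====
def Claim_equal_part1 : Prop := ∀ (data : List String), Dom_part1 data → Spec_part1 data (part1 data)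

-- ===== LEMMAS AND PROOFS =====

-- the positions A's walk ranges over
def part1Inv (p : Int × Int) : Prop := 0 ≤ p.1 ∧ p.1 ≤ 2 ∧ 0 ≤ p.2 ∧ p.2 ≤ 2

-- one character: B's flat move agrees with A's guarded pair step under the flat encoding
theorem part1_step_flat (p : Int × Int) (c : Char) (h : part1Inv p) :
    part1Move (3 * p.1 + p.2) (part1MoveOf c) =
      3 * (part1Step p c).1 + (part1Step p c).2 ∧ part1Inv (part1Step p c) := by
  obtain ⟨p₁, p₂⟩ := p
  obtain ⟨h1, h2, h3, h4⟩ := h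
  by_cases hU : c = 'U' <;> by_cases hD : c = 'D' <;>
    by_cases hL : c = 'L' <;> by_cases hR : c = 'R' <;>
    simp only [part1Move, part1MoveOf, part1Step, part1Inv, hU, hD, hL, hR, if_true,
      if_false] <;>
    (interval_cases p₁ <;> interval_cases p₂ <;> simp_all)

-- a whole line: folding B's flat move agrees with folding A's step
theorem part1_line_flat (l : List Char) (p : Int × Int) (h : part1Inv p) :
    l.foldl (fun s c => part1Move s (part1MoveOf c)) (3 * p.1 + p.2) =
      3 * (l.foldl part1Step p).1 + (l.foldl part1Step p).2 ∧
      part1Inv (l.foldl part1Step p) := by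
  induction l generalizing p with
  | nil => exact ⟨rfl, h⟩
  | cons c l ih =>
    obtain ⟨he, hi⟩ := part1_step_flat p c h
    obtain ⟨he', hi'⟩ := ih (part1Step p c) hi
    exact ⟨by simpa only [List.foldl_cons, he] using he', hi'⟩

-- B's per-line transition table applied at s is the sequential fold of the flat move from s
theorem part1_table_apply (l : List Char) (t : List Int) (s : Int) (hs : 0 ≤ s)
    (hlt : s.toNat < t.length) :
    (PySem.List.pyGet? (l.foldl
        (fun (t : List Int) ch => t.map (fun s => part1Move s (part1MoveOf ch))) t) s).getD 0
      = l.foldl (fun s c => part1Move s (part1MoveOf c)) ((PySem.List.pyGet? t s).getD 0) := by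
  induction l generalizing t with
  | nil => rfl
  | cons c l ih =>
    simp only [List.foldl_cons]
    rw [ih _ (by simpa using hlt)]
    congr 1
    rw [PySem.List.pyGet?_of_nonneg _ hs, PySem.List.pyGet?_of_nonneg _ hs]
    simp [hlt]

-- the identity table list(range(9)) looked up at s ∈ [0,8] is s
theorem part1_range_get (s : Int) (h0 : 0 ≤ s) (h8 : s ≤ 8) :
    (PySem.List.pyGet? (PySem.List.pyRange 0 9 1) s).getD 0 = s := by
  interval_cases s <;> decide

-- the digit: A's keypad lookup at p equals B's closed form on the flat state
theorem part1_digit_eq (p : Int × Int) (h : part1Inv p) :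
    PySem.Dict.getD part1Keypad p "" = PySem.Int.toStr (3 * p.1 + p.2 + 1) := by
  obtain ⟨p₁, p₂⟩ := p
  obtain ⟨h1, h2, h3, h4⟩ := h
  interval_cases p₁ <;> interval_cases p₂ <;> decide

-- the outer loop over lines
theorem part1_fold_eq (data : List String) (p : Int × Int) (code : String) (h : part1Inv p) :
    (data.foldl
      (fun (st : (Int × Int) × String) line =>
        let pos := line.toList.foldl part1Step st.1
        (pos, st.2 ++ PySem.Dict.getD part1Keypad pos "")) (p, code)).2
    = (data.foldl
      (fun (st : Int × String) line =>
        let table := line.toList.foldl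
          (fun (t : List Int) ch => t.map (fun s => part1Move s (part1MoveOf ch)))
          (PySem.List.pyRange 0 9 1)
        let s := (PySem.List.pyGet? table st.1).getD 0
        (s, st.2 ++ PySem.Int.toStr (s + 1))) (3 * p.1 + p.2, code)).2 := by
  induction data generalizing p code with
  | nil => rfl
  | cons line rest ih =>
    obtain ⟨hp1, hp2, hp3, hp4⟩ := h
    obtain ⟨he, hi⟩ := part1_line_flat line.toList p ⟨hp1, hp2, hp3, hp4⟩
    obtain ⟨hq1, hq2, hq3, hq4⟩ := hi
    simp only [List.foldl_cons]
    rw [part1_table_apply _ _ _ (by omega) (by simp [PySem.List.pyRange]; omega),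
        part1_range_get _ (by omega) (by omega), he, part1_digit_eq _ ⟨hq1, hq2, hq3, hq4⟩]
    exact ih _ _ ⟨hq1, hq2, hq3, hq4⟩

-- ===== VERDICT (by name: the statement is the Claim_ definition above) =====
theorem part1_spec : Claim_equal_part1 := by
  intro data _
  unfold Spec_part1 part1 part1_alt
  exact part1_fold_eq data (1, 1) "" ⟨by decide, by decide, by decide, by decide⟩
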